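-- pv_equiv track=rewrite | github.com/deadamned/SuperWise | data.py | create_dictionary_int
-- ===== SOURCE A (Python) =====
-- def create_dictionary_int(text_tab):
--     vocab_to_int = {}
--     count = 0
--     for text in text_tab:
--         for character in text:
--             if character not in vocab_to_int:
--                 vocab_to_int[character] = count
--                 count += 1
--     codes = ['<PAD>', '<EOS>', '<GO>']
--     for code in codes:
--         vocab_to_int[code] = count
--         count += 1
--     return vocab_to_int
-- ===== SOURCE B (Python) =====
-- def create_dictionary_int(text_tab):
--     def uniq(seq):
--         if not seq:
--             return []
--         head = seq[0]
--         return [head] + uniq([c for c in seq[1:] if c != head])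
--
--     order = uniq([c for text in text_tab for c in text]) + ['<PAD>', '<EOS>', '<GO>']
--     return dict(zip(order, range(len(order))))
-- ===== Notes on version B (the rewrite author's own statement) =====
-- stated objective: alternative
-- what changed: A's single pass with a membership-guarded dict and running counter is replaced by a recursive duplicate-elimination (keep the head, recurse on the tail with all copies of the head filtered out), after which codes are assigned in one shot by zipping the ordered key list with range(len).
import Mathlib
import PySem

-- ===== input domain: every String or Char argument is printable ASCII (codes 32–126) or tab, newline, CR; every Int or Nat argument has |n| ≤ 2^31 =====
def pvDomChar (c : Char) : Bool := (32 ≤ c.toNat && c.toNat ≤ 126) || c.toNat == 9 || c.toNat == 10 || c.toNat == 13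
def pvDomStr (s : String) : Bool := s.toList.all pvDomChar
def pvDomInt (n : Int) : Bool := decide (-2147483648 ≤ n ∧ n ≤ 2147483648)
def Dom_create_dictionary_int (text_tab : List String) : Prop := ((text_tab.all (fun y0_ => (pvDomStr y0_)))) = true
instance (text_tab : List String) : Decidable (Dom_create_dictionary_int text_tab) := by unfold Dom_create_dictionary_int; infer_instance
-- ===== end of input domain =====

-- B replaces A's membership-guarded counter loop by a recursive duplicate-elimination
-- (keep the head, recurse on the tail with the head's copies filtered out) and then
-- assigns all codes at once with dict(zip(order, range(len(order)))) (objective: alternative).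

-- ===== PORT A =====
-- literal port: a dict + counter, the inner loop inserts each unseen character at the current count
def create_dictionary_int (text_tab : List String) : List (String × Int) :=
  let st :=
    text_tab.foldl
      (fun st text =>
        text.toList.foldl
          (fun (st : PySem.Dict String Int × Int) character =>
            if (st.1.contains (String.ofList [character])) = true then st
            else (st.1.insert (String.ofList [character]) st.2, st.2 + 1))
          st)
      (PySem.Dict.empty, 0)
  let st2 :=
    ["<PAD>", "<EOS>", "<GO>"].foldl
      (fun (st : PySem.Dict String Int × Int) code => (st.1.insert code st.2, st.2 + 1)) st
  st2.1.items

-- ===== PORT B =====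
-- literal port of Source B's recursive helper 'uniq': keep the head, drop its copies, recurse
def pvUniqB : List String → List String
  | [] => []
  | head :: rest => head :: pvUniqB (rest.filter (fun c => c ≠ head))
termination_by l => l.length
decreasing_by
  simpa [Nat.lt_succ_iff] using (List.length_filter_le _ _).trans (by simp)

-- literal port of Source B: uniq of all characters ++ codes, then dict(zip(order, range(len(order))))
def create_dictionary_int_alt (text_tab : List String) : List (String × Int) :=
  let order := pvUniqB (text_tab.flatMap (fun text => text.toList.map (fun c => String.ofList [c])))
      ++ ["<PAD>", "<EOS>", "<GO>"]
  (PySem.Dict.ofList (order.zip (PySem.List.pyRange 0 (order.length : Int) 1))).items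

-- ===== PRECONDITION & SPEC =====
def Spec_create_dictionary_int (text_tab : List String) (out : List (String × Int)) : Prop := out = create_dictionary_int_alt text_tab
instance (text_tab : List String) (out : List (String × Int)) : Decidable (Spec_create_dictionary_int text_tab out) := by unfold Spec_create_dictionary_int; infer_instance

-- ===== CLAIM (what is proved, stated in full; the proofs are below) =====
def Claim_equal_create_dictionary_int : Prop := ∀ (text_tab : List String), Dom_create_dictionary_int text_tab → Spec_create_dictionary_int text_tab (create_dictionary_int text_tab)

-- ===== LEMMAS AND PROOFS =====

-- B's recursive duplicate-elimination computes the ordered set of first occurrences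
theorem pv_ofList_filter {α : Type} [BEq α] [LawfulBEq α] (p : α → Bool) (xs : List α) :
    PySem.Set.ofList (xs.filter p) = (PySem.Set.ofList xs).filter p := by
  induction xs with
  | nil => rfl
  | cons a xs ih =>
    rw [PySem.Set.ofList_cons, PySem.Set.discard]
    by_cases hpa : p a = true
    · rw [List.filter_cons_of_pos hpa, PySem.Set.ofList_cons, PySem.Set.discard, ih,
        List.filter_cons_of_pos hpa, List.filter_filter, List.filter_filter]
      exact congrArg (a :: ·) (List.filter_congr (fun y _ => by rw [Bool.and_comm]))
    · rw [List.filter_cons_of_neg hpa, ih, List.filter_cons, if_neg hpa, List.filter_filter]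
      refine List.filter_congr (fun y _ => ?_)
      by_cases hya : y = a
      · subst hya
        simp [Bool.eq_false_iff.mpr hpa]
      · simp [hya]

theorem pvUniqB_eq_ofList (l : List String) : pvUniqB l = PySem.Set.ofList l := by
  cases l with
  | nil => rw [pvUniqB.eq_def]; rfl
  | cons head rest =>
    have ih := pvUniqB_eq_ofList (rest.filter (fun c => decide (c ≠ head)))
    rw [pvUniqB.eq_def]
    show head :: pvUniqB (rest.filter (fun c => decide (c ≠ head))) = _
    rw [ih, PySem.Set.ofList_cons]
    have hp : (fun c => decide (c ≠ head)) = (fun c => !(c == head)) := by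
      funext c; simp only [ne_eq, decide_not]; exact congrArg (! ·) (beq_eq_decide c head).symm
    rw [hp, pv_ofList_filter]
    rfl
termination_by l.length
decreasing_by simpa [Nat.lt_succ_iff] using List.length_filter_le _ _

-- zip with range(len) is enumerate with the components swapped
theorem pv_zip_pyRange (xs : List String) (s : Int) :
    xs.zip (PySem.List.pyRange s (s + xs.length) 1)
      = (PySem.List.enumerate xs s).map (fun p => (p.2, p.1)) := by
  induction xs generalizing s with
  | nil => simp [PySem.List.pyRange_one_eq_nil le_rfl, PySem.List.enumerate_nil]
  | cons x xs ih =>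
    have hlt : s < s + ((x :: xs).length : Int) := by
      have h0 : (0 : Int) < ((x :: xs).length : Int) := by exact_mod_cast Nat.succ_pos xs.length
      linarith
    rw [PySem.List.pyRange_one_cons hlt, PySem.List.enumerate_cons]
    have h : s + ((x :: xs).length : Int) = (s + 1) + xs.length := by
      simp only [List.length_cons]; push_cast; ring
    rw [h]
    simp only [List.zip_cons_cons, List.map_cons, ih (s + 1)]

-- the dict that maps the k-th element of s to k (the state A's character loop maintains)
def pvDictOf (s : List String) : PySem.Dict String Int :=
  (PySem.List.enumerate s 0).foldl (fun (d : PySem.Dict String Int) p => d.insert p.2 p.1) PySem.Dict.empty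

theorem pvDictOf_keys (s : List String) : (pvDictOf s).keys = PySem.Set.ofList s := by
  unfold pvDictOf
  rw [PySem.Dict.keys_foldl_insert_key (PySem.List.enumerate s) (fun p => p.2) (fun _ p => p.1) PySem.Dict.empty]
  simp [PySem.List.map_snd_enumerate, PySem.Set.update, PySem.Set.ofList_eq_foldl]

theorem pvDictOf_contains (s : List String) (x : String) :
    (pvDictOf s).contains x = decide (x ∈ s) := by
  rw [PySem.Dict.contains_eq_decide_mem_keys, pvDictOf_keys]
  simp [PySem.Set.mem_ofList]

theorem pvDictOf_snoc (s : List String) (c : String) :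
    pvDictOf (s ++ [c]) = (pvDictOf s).insert c (s.length : Int) := by
  unfold pvDictOf
  rw [PySem.List.enumerate_append, List.foldl_append]
  simp [PySem.List.enumerate]

theorem pvDictOf_items (s : List String) (hnd : s.Nodup) :
    (pvDictOf s).items = (PySem.List.enumerate s 0).map (fun p => (p.2, p.1)) := by
  unfold pvDictOf
  rw [PySem.Dict.items_foldl_insert_fresh (PySem.List.enumerate s) (fun p => p.2) (fun p => p.1)
      PySem.Dict.empty (fun a _ => by simp [PySem.Dict.contains_empty])
      (by simpa [PySem.List.map_snd_enumerate] using hnd)]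
  rfl

-- invariant of A's character loop: starting from the dict of a duplicate-free s with count = |s|,
-- processing cs yields the dict of s updated (set-wise) with the chars of cs, count = its length
theorem pvLoop_inv (cs : List Char) (s : List String) (hnd : s.Nodup) :
    cs.foldl
      (fun (st : PySem.Dict String Int × Int) character =>
        if (st.1.contains (String.ofList [character])) = true then st
        else (st.1.insert (String.ofList [character]) st.2, st.2 + 1))
      (pvDictOf s, (s.length : Int))
    = (pvDictOf (PySem.Set.update s (cs.map (fun ch => String.ofList [ch]))),
       ((PySem.Set.update s (cs.map (fun ch => String.ofList [ch]))).length : Int)) := by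
  induction cs generalizing s with
  | nil => simp [PySem.Set.update]
  | cons c cs ih =>
    simp only [List.foldl_cons, List.map_cons]
    by_cases hc : (String.ofList [c]) ∈ s
    · rw [if_pos]
      · rw [ih s hnd]
        have : PySem.Set.add s (String.ofList [c]) = s := PySem.Set.add_of_mem hc
        simp [PySem.Set.update, this]
      · simp [pvDictOf_contains, hc]
    · rw [if_neg]
      · have hadd : PySem.Set.add s (String.ofList [c]) = s ++ [String.ofList [c]] :=
          PySem.Set.add_of_not_mem hc
        have hnd' : (s ++ [String.ofList [c]]).Nodup := by
          rw [List.nodup_append]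
          refine ⟨hnd, List.nodup_singleton _, ?_⟩
          intro a ha b hb h
          subst h
          exact hc ((List.mem_singleton.mp hb) ▸ ha)
        have := ih (s ++ [String.ofList [c]]) hnd'
        rw [← pvDictOf_snoc]
        simp only [List.length_append, List.length_cons, List.length_nil] at this ⊢
        push_cast at this ⊢
        rw [this]
        simp [PySem.Set.update, hadd]
      · simp [pvDictOf_contains, hc]

-- A's loop started from the empty dict (pvLoop_inv specialised to s = [])
theorem pvLoop_start (cs : List Char) :
    cs.foldl
      (fun (st : PySem.Dict String Int × Int) character =>
        if (st.1.contains (String.ofList [character])) = true then st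
        else (st.1.insert (String.ofList [character]) st.2, st.2 + 1))
      (PySem.Dict.empty, 0)
    = (pvDictOf (PySem.Set.update [] (cs.map (fun ch => String.ofList [ch]))),
       ((PySem.Set.update [] (cs.map (fun ch => String.ofList [ch]))).length : Int)) :=
  pvLoop_inv cs [] List.nodup_nil

theorem pvUniq_short (text_tab : List String) (x : String)
    (hx : x ∈ PySem.Set.ofList (text_tab.flatMap (fun t => t.toList.map (fun ch => String.ofList [ch])))) :
    x.toList.length = 1 := by
  rw [PySem.Set.mem_ofList] at hx
  simp only [List.mem_flatMap, List.mem_map] at hx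
  obtain ⟨t, _, c, _, rfl⟩ := hx
  simp

-- ===== VERDICT (by name: the statement is the Claim_ definition above) =====
theorem create_dictionary_int_spec : Claim_equal_create_dictionary_int := by
  intro text_tab _
  unfold Spec_create_dictionary_int create_dictionary_int create_dictionary_int_alt
  -- flatten A's nested loop
  rw [← List.foldl_flatMap, pvLoop_start (text_tab.flatMap (fun t => t.toList))]
  set S := PySem.Set.update [] ((text_tab.flatMap (fun t => t.toList)).map (fun ch => String.ofList [ch])) with hS
  have hSofList : S = PySem.Set.ofList (text_tab.flatMap (fun t => t.toList.map (fun ch => String.ofList [ch]))) := by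
    simp [hS, PySem.Set.update, PySem.Set.ofList_eq_foldl, List.map_flatMap]
  have hnodupS : S.Nodup := by rw [hSofList]; exact PySem.Set.nodup_ofList _
  have hshort : ∀ x ∈ S, x.toList.length = 1 := by
    intro x hx; exact pvUniq_short text_tab x (hSofList ▸ hx)
  have hfreshPAD : ("<PAD>" : String) ∉ S := fun h => by simpa using hshort _ h
  have hfreshEOS : ("<EOS>" : String) ∉ S := fun h => by simpa using hshort _ h
  have hfreshGO : ("<GO>" : String) ∉ S := fun h => by simpa using hshort _ h
  -- A's tail loop over the three codes, unfolded
  simp only [List.foldl_cons, List.foldl_nil]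
  -- B's uniq is the same ordered set
  have hUniq : pvUniqB (text_tab.flatMap (fun t => t.toList.map (fun c => String.ofList [c]))) = S := by
    rw [pvUniqB_eq_ofList, hSofList]
  rw [hUniq]
  have hndAll : (S ++ ["<PAD>", "<EOS>", "<GO>"]).Nodup := by
    rw [List.nodup_append]
    refine ⟨hnodupS, by decide, ?_⟩
    intro x hx b hb h
    subst h
    have h1 := hshort x hx
    rcases List.mem_cons.mp hb with rfl | hb
    · exact absurd h1 (by decide)
    rcases List.mem_cons.mp hb with rfl | hb
    · exact absurd h1 (by decide)
    rcases List.mem_cons.mp hb with rfl | hb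
    · exact absurd h1 (by decide)
    · simp at hb
  -- B's dict(zip(order, range(len(order)))): items of a dict over distinct keys
  set order := S ++ ["<PAD>", "<EOS>", "<GO>"] with horder
  have hzip : order.zip (PySem.List.pyRange 0 (order.length : Int) 1)
      = (PySem.List.enumerate order 0).map (fun p => (p.2, p.1)) := by
    have := pv_zip_pyRange order 0
    rwa [zero_add] at this
  have hB : (PySem.Dict.ofList (order.zip (PySem.List.pyRange 0 (order.length : Int) 1))).items
      = (PySem.List.enumerate order 0).map (fun p => (p.2, p.1)) := by
    rw [hzip]
    show ((((PySem.List.enumerate order 0).map (fun p => (p.2, p.1))).foldl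
        (fun (acc : PySem.Dict String Int) p => acc.insert p.1 p.2) PySem.Dict.empty)).items = _
    rw [PySem.Dict.items_foldl_insert_fresh ((PySem.List.enumerate order 0).map (fun p => (p.2, p.1)))
        (fun p => p.1) (fun p => p.2)
        PySem.Dict.empty (fun a _ => by simp [PySem.Dict.contains_empty])
        (by simpa [List.map_map, Function.comp_def, PySem.List.map_snd_enumerate] using hndAll)]
    simp [Function.comp_def]
    rfl
  rw [hB, horder, PySem.List.enumerate_append]
  -- now compute the A side items
  have c1 : (pvDictOf S).contains "<PAD>" = false := by simp [pvDictOf_contains, hfreshPAD]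
  have c2 : ((pvDictOf S).insert "<PAD>" (S.length : Int)).contains "<EOS>" = false := by
    rw [PySem.Dict.contains_insert]
    simp [pvDictOf_contains, hfreshEOS]
  have c3 : (((pvDictOf S).insert "<PAD>" (S.length : Int)).insert "<EOS>" ((S.length : Int) + 1)).contains "<GO>" = false := by
    rw [PySem.Dict.contains_insert, PySem.Dict.contains_insert]
    simp [pvDictOf_contains, hfreshGO]
  rw [PySem.Dict.items_insert_of_not_contains _ _ c3,
      PySem.Dict.items_insert_of_not_contains _ _ c2,
      PySem.Dict.items_insert_of_not_contains _ _ c1,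
      pvDictOf_items S hnodupS]
  simp [PySem.List.enumerate]
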